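-- pv_equiv track=rewrite | github.com/asakatida/data-structures-and-algorithms.py | challenges/shift-array/shift_array.py | yieldItemsWithItem
-- ===== SOURCE A (Python) =====
-- def yieldItemsWithItem(array, item, count, pos):
--     """
--     Yield items from array with item inserted at the given position.
--
--     INPUT
--     <= array object
--     <= new item
--     <= array length
--     <= middle position
--     OUTPUT => sequence of items from the array and item
--     """
--     insertCheck = False
--     for i in range(count):
--         if insertCheck:
--             yield array[i - 1]
--         elif i == pos:
--             yield item
--             insertCheck = True
--         else:
--             yield array[i]
-- ===== SOURCE B (Python) =====
-- def yieldItemsWithItem(array, item, count, pos):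
--     """Yield items from array with item inserted at position pos (if 0 <= pos < count)."""
--     if 0 <= pos < count:
--         for i in range(pos):
--             yield array[i]
--         yield item
--         for i in range(pos, count - 1):
--             yield array[i]
--     else:
--         for i in range(count):
--             yield array[i]
-- ===== Notes on version B (the rewrite author's own statement) =====
-- stated objective: simpler
-- what changed: Replaced the flag-driven single loop with an explicit three-phase decomposition: prefix indices before pos, the inserted item, then the shifted tail (or the plain count-length scan when pos is outside [0,count)), eliminating the insertCheck state variable.
import Mathlib
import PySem

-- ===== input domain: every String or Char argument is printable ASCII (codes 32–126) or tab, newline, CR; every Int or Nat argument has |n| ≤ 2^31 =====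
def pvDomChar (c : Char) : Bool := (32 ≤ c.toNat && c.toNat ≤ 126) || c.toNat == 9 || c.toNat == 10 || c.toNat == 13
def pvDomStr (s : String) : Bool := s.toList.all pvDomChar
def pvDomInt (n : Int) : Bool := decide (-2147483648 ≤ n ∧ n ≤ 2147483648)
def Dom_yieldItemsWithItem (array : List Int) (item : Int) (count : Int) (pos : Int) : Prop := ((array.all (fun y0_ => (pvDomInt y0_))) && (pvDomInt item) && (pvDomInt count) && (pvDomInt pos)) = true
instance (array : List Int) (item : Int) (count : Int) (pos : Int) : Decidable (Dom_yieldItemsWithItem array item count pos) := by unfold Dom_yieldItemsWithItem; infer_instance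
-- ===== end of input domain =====

-- B replaces A's flag-driven single loop by an explicit three-phase decomposition (prefix / item / shifted tail,
-- or a plain scan when no insertion happens); objective: simpler. Equal return value on all inputs where A returns.

-- ===== PORT A =====
-- one iteration of A's loop body; array[i] → pyGetD with default 0 (Pre_ guarantees every accessed index is
-- in range, elsewhere Python raises IndexError and the input is outside Pre_)
def stepA (array : List Int) (item : Int) (pos : Int) (st : Bool × List Int) (i : Int) : Bool × List Int :=
  if st.1 then (st.1, st.2 ++ [PySem.List.pyGetD array (i - 1) 0])
  else if i = pos then (true, st.2 ++ [item])
  else (st.1, st.2 ++ [PySem.List.pyGetD array i 0])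

def yieldItemsWithItem (array : List Int) (item : Int) (count : Int) (pos : Int) : List Int :=
  ((PySem.List.pyRange 0 count 1).foldl (stepA array item pos) (false, [])).2

-- ===== PORT B =====
def yieldItemsWithItem_alt (array : List Int) (item : Int) (count : Int) (pos : Int) : List Int :=
  if 0 ≤ pos ∧ pos < count then
    (PySem.List.pyRange 0 pos 1).map (fun i => PySem.List.pyGetD array i 0)
      ++ [item]
      ++ (PySem.List.pyRange pos (count - 1) 1).map (fun i => PySem.List.pyGetD array i 0)
  else
    (PySem.List.pyRange 0 count 1).map (fun i => PySem.List.pyGetD array i 0)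

-- ===== PRECONDITION & SPEC =====
-- Pre_ excludes exactly the inputs on which Python A raises IndexError while being consumed:
-- when the item is inserted (0 ≤ pos < count) the loop reads indices up to count-2, otherwise up to count-1.
def Pre_yieldItemsWithItem (array : List Int) (item : Int) (count : Int) (pos : Int) : Prop :=
  (0 ≤ pos ∧ pos < count → count - 1 ≤ (array.length : Int)) ∧
  (¬ (0 ≤ pos ∧ pos < count) → count ≤ (array.length : Int))
instance (array : List Int) (item : Int) (count : Int) (pos : Int) : Decidable (Pre_yieldItemsWithItem array item count pos) := by unfold Pre_yieldItemsWithItem; infer_instance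

def pvWitness_yieldItemsWithItem : List Int × Int × Int × Int := ([5, 6, 7], 9, 4, 2)

def Spec_yieldItemsWithItem (array : List Int) (item : Int) (count : Int) (pos : Int) (out : List Int) : Prop := out = yieldItemsWithItem_alt array item count pos
instance (array : List Int) (item : Int) (count : Int) (pos : Int) (out : List Int) : Decidable (Spec_yieldItemsWithItem array item count pos out) := by unfold Spec_yieldItemsWithItem; infer_instance

-- ===== CLAIM (what is proved, stated in full; the proofs are below) =====
def Claim_equal_yieldItemsWithItem : Prop := ∀ (array : List Int) (item : Int) (count : Int) (pos : Int), Dom_yieldItemsWithItem array item count pos → Pre_yieldItemsWithItem array item count pos → Spec_yieldItemsWithItem array item count pos (yieldItemsWithItem array item count pos)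

-- ===== LEMMAS AND PROOFS =====

-- characterisation of A's loop state after processing range(0, n)
theorem loopA_char (array : List Int) (item pos : Int) (n : Nat) :
    (PySem.List.pyRange 0 (n : Int) 1).foldl (stepA array item pos) (false, []) =
    (decide (0 ≤ pos ∧ pos < (n : Int)),
     if 0 ≤ pos ∧ pos < (n : Int) then
       (PySem.List.pyRange 0 pos 1).map (fun i => PySem.List.pyGetD array i 0)
         ++ [item]
         ++ (PySem.List.pyRange pos ((n : Int) - 1) 1).map (fun i => PySem.List.pyGetD array i 0)
     else
       (PySem.List.pyRange 0 (n : Int) 1).map (fun i => PySem.List.pyGetD array i 0)) := by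
  induction n with
  | zero =>
    simp [PySem.List.pyRange_one_eq_nil]
  | succ n ih =>
    have hcast : ((n + 1 : Nat) : Int) = (n : Int) + 1 := by push_cast; ring
    rw [hcast, PySem.List.pyRange_one_succ_right (by positivity), List.foldl_append, ih]
    by_cases h1 : 0 ≤ pos ∧ pos < (n : Int)
    · -- flag already true: append array[n-1]
      have h2 : 0 ≤ pos ∧ pos < (n : Int) + 1 := ⟨h1.1, by omega⟩
      have htail : (PySem.List.pyRange pos (n : Int) 1).map (fun i => PySem.List.pyGetD array i 0)
          = (PySem.List.pyRange pos ((n : Int) - 1) 1).map (fun i => PySem.List.pyGetD array i 0)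
            ++ [PySem.List.pyGetD array ((n : Int) - 1) 0] := by
        have h := PySem.List.pyRange_one_succ_right (a := pos) (b := (n : Int) - 1) (by omega)
        rw [show (n : Int) - 1 + 1 = (n : Int) by ring] at h
        rw [h, List.map_append]; simp
      simp [stepA, h1, h2, htail]
    · by_cases hp : pos = (n : Int)
      · -- i == pos fires now
        have h2 : 0 ≤ pos ∧ pos < (n : Int) + 1 := ⟨by omega, by omega⟩
        have htail : PySem.List.pyRange pos ((n : Int) + 1 - 1) 1 = [] := by
          apply PySem.List.pyRange_one_eq_nil; omega
        simp [stepA, hp, htail]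
      · -- no insertion yet: append array[n]
        have h2 : ¬ (0 ≤ pos ∧ pos < (n : Int) + 1) := by omega
        have hfull : PySem.List.pyRange 0 ((n : Int) + 1) 1
            = PySem.List.pyRange 0 (n : Int) 1 ++ [(n : Int)] := by
          exact PySem.List.pyRange_one_succ_right (by positivity)
        simp [stepA, h1, Ne.symm hp]
        refine ⟨by omega, ?_⟩
        intro hp0 hpn
        exact absurd ⟨hp0, by omega⟩ h1

-- ===== VERDICT (by name: the statement is the Claim_ definition above) =====
theorem yieldItemsWithItem_spec : Claim_equal_yieldItemsWithItem := by
  intro array item count pos _ _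
  unfold Spec_yieldItemsWithItem yieldItemsWithItem yieldItemsWithItem_alt
  by_cases hc : count ≤ 0
  · have hnil : PySem.List.pyRange 0 count 1 = [] := PySem.List.pyRange_one_eq_nil hc
    have hcond : ¬ (0 ≤ pos ∧ pos < count) := by omega
    simp [hnil, hcond]
  · obtain ⟨n, hn⟩ : ∃ n : Nat, count = (n : Int) := ⟨count.toNat, by omega⟩
    subst hn
    rw [loopA_char]
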